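-- pv_equiv track=rewrite | github.com/hwjiang1510/CoFie | utils/recon_utils.py | find_first_occurrences
-- ===== SOURCE A (Python) =====
-- def find_first_occurrences(lst):
--     seen = set()
--     output = []
--     for element in lst:
--         if element not in seen:
--             output.append(1)
--             seen.add(element)
--         else:
--             output.append(0)
--     return output
-- ===== SOURCE B (Python) =====
-- def find_first_occurrences(lst):
--     first_index = {}
--     for i, element in enumerate(lst):
--         if element not in first_index:
--             first_index[element] = i
--     return [1 if first_index[element] == i else 0 for i, element in enumerate(lst)]
-- ===== Notes on version B (the rewrite author's own statement) =====
-- stated objective: alternative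
-- what changed: Replaces the single-pass seen-set loop by two passes: first build a dict mapping each element to the index of its first appearance, then emit 1 exactly at the positions whose index equals that first-appearance index.
import Mathlib
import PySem

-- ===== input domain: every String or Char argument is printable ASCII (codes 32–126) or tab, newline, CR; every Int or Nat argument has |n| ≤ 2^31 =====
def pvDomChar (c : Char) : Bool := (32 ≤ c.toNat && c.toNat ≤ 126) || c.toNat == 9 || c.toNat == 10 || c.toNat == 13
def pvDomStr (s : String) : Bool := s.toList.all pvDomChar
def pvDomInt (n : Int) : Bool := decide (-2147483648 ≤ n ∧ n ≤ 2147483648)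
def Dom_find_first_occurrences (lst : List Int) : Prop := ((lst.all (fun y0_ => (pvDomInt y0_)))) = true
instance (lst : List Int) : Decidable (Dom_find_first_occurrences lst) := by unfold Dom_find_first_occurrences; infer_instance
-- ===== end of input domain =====

-- B replaces A's single-pass seen-set loop by two passes (build a first-appearance index
-- table, then compare each position with its element's first index); objective: alternative.

-- ===== PORT A =====
def find_first_occurrences (lst : List Int) : List Int :=
  (lst.foldl
    (fun (st : PySem.Set Int × List Int) element =>
      if !(PySem.Set.contains st.1 element) then
        (PySem.Set.add st.1 element, st.2 ++ [(1 : Int)])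
      else
        (st.1, st.2 ++ [(0 : Int)]))
    (PySem.Set.empty, [])).2

-- ===== PORT B =====
-- first pass of Source B: first_index = {}; for i, element in enumerate(lst): if absent, first_index[element] = i
def pvFirstIndex (lst : List Int) : PySem.Dict Int Int :=
  (PySem.List.enumerate lst 0).foldl
    (fun d p => if !(d.contains p.2) then d.insert p.2 p.1 else d)
    PySem.Dict.empty

-- second pass; 'first_index[element]' is ported as getD with default -1: every element of lst
-- is a key of first_index, so the default is unreachable
def find_first_occurrences_alt (lst : List Int) : List Int :=
  (PySem.List.enumerate lst 0).map
    (fun p => if (pvFirstIndex lst).getD p.2 (-1) == p.1 then (1 : Int) else 0)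

-- ===== PRECONDITION & SPEC =====
def Spec_find_first_occurrences (lst : List Int) (out : List Int) : Prop := out = find_first_occurrences_alt lst
instance (lst : List Int) (out : List Int) : Decidable (Spec_find_first_occurrences lst out) := by unfold Spec_find_first_occurrences; infer_instance

-- ===== CLAIM (what is proved, stated in full; the proofs are below) =====
def Claim_equal_find_first_occurrences : Prop := ∀ (lst : List Int), Dom_find_first_occurrences lst → Spec_find_first_occurrences lst (find_first_occurrences lst)

-- ===== LEMMAS AND PROOFS =====

-- reference form: 1 at a position iff its element does not occur in the prefix before it
def pvMask : List Int → List Int → List Int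
  | _, [] => []
  | pre, x :: xs => (if x ∈ pre then (0 : Int) else 1) :: pvMask (pre ++ [x]) xs

lemma pvA_go (suf : List Int) : ∀ (pre out : List Int),
    (suf.foldl
      (fun (st : PySem.Set Int × List Int) element =>
        if !(PySem.Set.contains st.1 element) then
          (PySem.Set.add st.1 element, st.2 ++ [(1 : Int)])
        else
          (st.1, st.2 ++ [(0 : Int)]))
      (PySem.Set.ofList pre, out)).2 = out ++ pvMask pre suf := by
  induction suf with
  | nil => intro pre out; simp [pvMask]
  | cons x xs ih =>
    intro pre out
    by_cases hx : x ∈ pre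
    · have hc : PySem.Set.contains (PySem.Set.ofList pre) x = true := by
        rw [PySem.Set.contains_iff]; exact (PySem.Set.mem_ofList _ _).2 hx
      have hadd : PySem.Set.ofList (pre ++ [x]) = PySem.Set.ofList pre := by
        rw [PySem.Set.ofList_append_singleton,
          PySem.Set.add_of_mem ((PySem.Set.mem_ofList _ _).2 hx)]
      simp only [List.foldl_cons, hc, Bool.not_true, Bool.false_eq_true, if_false]
      rw [← hadd, ih (pre ++ [x]) (out ++ [0])]
      simp [pvMask, hx]
    · have hc : PySem.Set.contains (PySem.Set.ofList pre) x = false := by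
        rw [Bool.eq_false_iff]
        intro h
        exact hx ((PySem.Set.mem_ofList _ _).1 ((PySem.Set.contains_iff _ _).1 h))
      have hadd : PySem.Set.add (PySem.Set.ofList pre) x = PySem.Set.ofList (pre ++ [x]) := by
        rw [PySem.Set.ofList_append_singleton]
      simp only [List.foldl_cons, hc, Bool.not_false, if_true]
      rw [hadd, ih (pre ++ [x]) (out ++ [1])]
      simp [pvMask, hx]

lemma pvFi_go (l : List Int) : ∀ (d : PySem.Dict Int Int) (s : Int) (x : Int),
    ((PySem.List.enumerate l s).foldl
      (fun d p => if !(d.contains p.2) then d.insert p.2 p.1 else d) d).get? x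
    = (match d.get? x with
       | some v => some v
       | none => (List.idxOf? x l).map (fun k => s + (k : Int))) := by
  induction l with
  | nil => intro d s x; cases h : d.get? x <;> simp [PySem.List.enumerate, h]
  | cons y ys ih =>
    intro d s x
    rw [PySem.List.enumerate_cons]
    simp only [List.foldl_cons]
    by_cases hcon : d.contains y = true
    · simp only [hcon, Bool.not_true, Bool.false_eq_true, if_false]
      rw [ih d (s + 1) x, List.idxOf?_cons]
      by_cases hxy : y = x
      · subst hxy
        have : (d.get? y).isSome := by rw [← PySem.Dict.contains_eq_isSome_get?]; exact hcon
        cases h : d.get? y with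
        | none => rw [h] at this; simp at this
        | some v => simp
      · cases d.get? x with
        | some v => simp
        | none =>
          have hyx : (y == x) = false := by simp [hxy]
          simp only [hyx, Bool.false_eq_true, if_false]
          cases List.idxOf? x ys
          · simp
          · simp; omega
    · simp only [hcon, Bool.not_false, if_true]
      rw [ih (d.insert y s) (s + 1) x, List.idxOf?_cons]
      by_cases hxy : x = y
      · subst hxy
        have hnone : d.get? x = none := by
          rw [PySem.Dict.get?_eq_none_iff_contains]; simpa using hcon
        rw [PySem.Dict.get?_insert_self, hnone]
        simp
      · rw [PySem.Dict.get?_insert_of_ne _ _ hxy]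
        cases d.get? x with
        | some v => simp
        | none =>
          have hyx : (y == x) = false := by simp [Ne.symm hxy]
          simp only [hyx, Bool.false_eq_true, if_false]
          cases List.idxOf? x ys
          · simp
          · simp; omega

lemma pvFirstIndex_get (lst : List Int) (x : Int) :
    (pvFirstIndex lst).get? x = (List.idxOf? x lst).map (fun k => (k : Int)) := by
  unfold pvFirstIndex
  rw [pvFi_go lst PySem.Dict.empty 0 x]
  simp [PySem.Dict.get?_empty]

lemma pvIdxOf?_append_self (pre xs : List Int) (x : Int) (h : x ∉ pre) :
    List.idxOf? x (pre ++ x :: xs) = some pre.length := by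
  induction pre with
  | nil => simp [List.idxOf?_cons]
  | cons p ps ih =>
    have hpx : p ≠ x := fun he => h (by simp [he])
    rw [List.cons_append, List.idxOf?_cons]
    simp [hpx, ih (fun hm => h (List.mem_cons_of_mem _ hm))]

lemma pvIdxOf?_append_mem (pre suf : List Int) (x : Int) (h : x ∈ pre) :
    ∃ j, List.idxOf? x (pre ++ suf) = some j ∧ j < pre.length := by
  induction pre with
  | nil => simp at h
  | cons p ps ih =>
    rw [List.cons_append, List.idxOf?_cons]
    by_cases hpx : p = x
    · exact ⟨0, by simp [hpx], by simp⟩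
    · have hm : x ∈ ps := by cases h with
        | head => exact absurd rfl hpx
        | tail _ hm => exact hm
      obtain ⟨j, hj, hlt⟩ := ih hm
      exact ⟨j + 1, by simp [hpx, hj], by simp; omega⟩

lemma pvB_go (L : List Int) : ∀ (suf pre : List Int), pre ++ suf = L →
    (PySem.List.enumerate suf (pre.length : Int)).map
      (fun p => if (pvFirstIndex L).getD p.2 (-1) == p.1 then (1 : Int) else 0)
    = pvMask pre suf := by
  intro suf
  induction suf with
  | nil => intro pre _; simp [PySem.List.enumerate, pvMask]
  | cons x xs ih =>
    intro pre hL
    rw [PySem.List.enumerate_cons, List.map_cons]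
    have hgetD : ∀ v : Int, (pvFirstIndex L).get? x = some v →
        (pvFirstIndex L).getD x (-1) = v := by
      intro v hv
      rw [PySem.Dict.getD_eq_get?_getD, hv]
      rfl
    have htail : (PySem.List.enumerate xs ((pre.length : Int) + 1)).map
        (fun p => if (pvFirstIndex L).getD p.2 (-1) == p.1 then (1 : Int) else 0)
        = pvMask (pre ++ [x]) xs := by
      have : ((pre.length : Int) + 1) = (((pre ++ [x]).length : Nat) : Int) := by
        simp
      rw [this, ih (pre ++ [x]) (by rw [← hL]; simp)]
    by_cases hx : x ∈ pre
    · obtain ⟨j, hj, hlt⟩ := pvIdxOf?_append_mem pre (x :: xs) x hx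
      have hsome : (pvFirstIndex L).get? x = some (j : Int) := by
        rw [pvFirstIndex_get, ← hL, hj]; rfl
      have hne : ((j : Int) == (pre.length : Int)) = false := by
        simp; omega
      rw [hgetD _ hsome, htail]
      simp [pvMask, hx, hne]
    · have hsome : (pvFirstIndex L).get? x = some (pre.length : Int) := by
        rw [pvFirstIndex_get, ← hL, pvIdxOf?_append_self pre xs x hx]; rfl
      rw [hgetD _ hsome, htail]
      simp [pvMask, hx]

-- ===== VERDICT (by name: the statement is the Claim_ definition above) =====
theorem find_first_occurrences_spec : Claim_equal_find_first_occurrences := by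
  intro lst _
  unfold Spec_find_first_occurrences find_first_occurrences find_first_occurrences_alt
  have hempty : (PySem.Set.empty : PySem.Set Int) = PySem.Set.ofList [] := rfl
  rw [hempty]
  have hA := pvA_go lst [] []
  have hB := pvB_go lst lst [] rfl
  simp only [List.nil_append] at hA
  simp only [List.length_nil, Int.natCast_zero] at hB
  rw [hA, hB]
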